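-- pv_equiv track=rewrite | github.com/jeevanprakashr/problem-solving | strivers/05_recursion/09_allPatterns.py | allSubSequencesWithSumK
-- ===== SOURCE A (Python) =====
-- def allSubSequencesWithSumK(arr, k):
--     '''
--     Given an array of numbers, print all the sub sequences whose sum is k
--     Eg: arr = [1, 2, 1], k = 2
--     sol = [1, 1] and [2]
--
--     Pattern:
--     The pattern we are going to see is the common and most important pattern that will be mostly used in recursion questions
--     The pattern is - chosen and not chosen
--     i.e, for every index, there are only two possible outcomes that need to be covered. Either chosen or not chosen
--     note: for not chosen outcome, pop the element that was chosen for chosen outcome before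
--     '''
--     def copyArr(a):
--         b = []
--         for num in a:
--             b.append(num)
--         return b
--
--     def getSubSequence(idx, total, comb):
--         if idx == n:
--             if total == k:
--                 res.append(copyArr(comb))
--             return
--         comb.append(arr[idx])
--         getSubSequence(idx + 1, total + arr[idx], comb)
--         comb.pop()
--         getSubSequence(idx + 1, total, comb)
--
--     n = len(arr)
--     res = []
--     getSubSequence(0, 0, [])
--     return res
--
-- arr = [1, 2, 1]
--
-- k = 2
-- ===== SOURCE B (Python) =====
-- def allSubSequencesWithSumK(arr, k):
--     n = len(arr)
--
--     def f(idx):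
--         if idx == n:
--             return [[]]
--         rest = f(idx + 1)
--         return [[arr[idx]] + s for s in rest] + rest
--
--     return [s for s in f(0) if sum(s) == k]
-- ===== Notes on version B (the rewrite author's own statement) =====
-- stated objective: simpler
-- what changed: Replaces the shared mutable accumulator/running-total backtracking with a pure value-returning recursion that builds the list of all subsequences of arr[idx:] and then filters by sum == k.
import Mathlib
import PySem

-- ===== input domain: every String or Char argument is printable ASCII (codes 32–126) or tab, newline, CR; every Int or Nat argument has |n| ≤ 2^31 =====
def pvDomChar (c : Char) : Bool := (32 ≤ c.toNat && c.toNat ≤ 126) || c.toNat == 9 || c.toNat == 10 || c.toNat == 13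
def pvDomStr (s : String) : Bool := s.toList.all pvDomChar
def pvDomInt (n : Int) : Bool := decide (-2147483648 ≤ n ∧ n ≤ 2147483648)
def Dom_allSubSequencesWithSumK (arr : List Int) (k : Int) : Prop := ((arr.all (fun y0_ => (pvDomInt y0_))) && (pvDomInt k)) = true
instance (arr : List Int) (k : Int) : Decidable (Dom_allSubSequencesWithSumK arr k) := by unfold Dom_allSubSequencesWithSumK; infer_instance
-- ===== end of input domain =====

-- B is a simpler pure recursion (no mutable accumulator); same return value as A everywhere.

-- ===== PORT A =====
-- Python A's DFS `getSubSequence(idx, total, comb)` appending to `res`: modelled as the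
-- list of results it appends, in order (include branch first, then exclude branch).
-- The `else if h : …` guard only establishes termination; Python's idx never exceeds n.
def pvGoA (arr : List Int) (k : Int) (idx : Nat) (total : Int) (comb : List Int) : List (List Int) :=
  if idx = arr.length then
    (if total = k then [comb] else [])
  else if h : idx < arr.length then
    pvGoA arr k (idx + 1) (total + arr.getD idx 0) (comb ++ [arr.getD idx 0]) ++
      pvGoA arr k (idx + 1) total comb
  else []
termination_by arr.length - idx
decreasing_by all_goals omega

def allSubSequencesWithSumK (arr : List Int) (k : Int) : List (List Int) :=
  pvGoA arr k 0 0 []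

-- ===== PORT B =====
-- Python B's `f(idx)`: all subsequences of arr[idx:], include-branch first.
def pvF (arr : List Int) (idx : Nat) : List (List Int) :=
  if idx = arr.length then
    [[]]
  else if h : idx < arr.length then
    (pvF arr (idx + 1)).map (fun s => arr.getD idx 0 :: s) ++ pvF arr (idx + 1)
  else []
termination_by arr.length - idx
decreasing_by all_goals omega

def allSubSequencesWithSumK_alt (arr : List Int) (k : Int) : List (List Int) :=
  (pvF arr 0).filter (fun s => s.sum = k)

-- ===== PRECONDITION & SPEC =====
def Spec_allSubSequencesWithSumK (arr : List Int) (k : Int) (out : List (List Int)) : Prop := out = allSubSequencesWithSumK_alt arr k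
instance (arr : List Int) (k : Int) (out : List (List Int)) : Decidable (Spec_allSubSequencesWithSumK arr k out) := by unfold Spec_allSubSequencesWithSumK; infer_instance

-- ===== CLAIM (what is proved, stated in full; the proofs are below) =====
def Claim_equal_allSubSequencesWithSumK : Prop := ∀ (arr : List Int) (k : Int), Dom_allSubSequencesWithSumK arr k → Spec_allSubSequencesWithSumK arr k (allSubSequencesWithSumK arr k)

-- ===== LEMMAS AND PROOFS =====

-- Invariant: A's DFS from (idx, total, comb) yields exactly B's subsequences of arr[idx:]
-- whose sum completes `total` to k, each prefixed by `comb`, in the same order.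
theorem pvGoA_eq_filter (arr : List Int) (k : Int) :
    ∀ (d idx : Nat) (total : Int) (comb : List Int), arr.length - idx = d → idx ≤ arr.length →
      pvGoA arr k idx total comb =
        ((pvF arr idx).filter (fun s => total + s.sum = k)).map (fun s => comb ++ s) := by
  intro d
  induction d with
  | zero =>
    intro idx total comb hd hle
    have h : idx = arr.length := by omega
    rw [pvGoA, pvF]
    rcases eq_or_ne total k with ht | ht <;> simp [h, ht]
  | succ d ih =>
    intro idx total comb hd hle
    have h : idx < arr.length := by omega
    have hne : idx ≠ arr.length := by omega
    rw [pvGoA, pvF]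
    simp only [hne, if_false, h, dif_pos]
    rw [ih (idx + 1) (total + arr.getD idx 0) (comb ++ [arr.getD idx 0]) (by omega) (by omega),
        ih (idx + 1) total comb (by omega) (by omega)]
    rw [List.filter_append, List.map_append, List.filter_map, List.map_map]
    congr 1
    · rw [show (fun s => decide (total + s.sum = k)) ∘ (fun s => arr.getD idx 0 :: s)
            = (fun s => decide (total + arr.getD idx 0 + s.sum = k)) from by
        funext s; simp [List.sum_cons]; constructor <;> intro hh <;> omega]
      congr 1
      funext s
      simp

theorem allSubSequencesWithSumK_spec : Claim_equal_allSubSequencesWithSumK := by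
  intro arr k _
  unfold Spec_allSubSequencesWithSumK allSubSequencesWithSumK allSubSequencesWithSumK_alt
  rw [pvGoA_eq_filter arr k (arr.length - 0) 0 0 [] rfl (by omega)]
  simp
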